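-- pv_equiv track=rewrite | github.com/BMariscal/study-notebook | ds_and_algos/data_structures/graphs/work/BFS.py | bfs
-- ===== SOURCE A (Python) =====
-- from collections import deque
-- from collections import deque
-- from collections import deque
--
-- def bfs(graph, root):
--     visited = set()
--     queue = deque([root])
--     while queue:
--         vertex = queue.popleft()
--         for neighbour in graph[vertex]:
--             if neighbour not in visited:
--                 visited.add(neighbour)
--                 queue.append(neighbour)
--     return visited
-- ===== SOURCE B (Python) =====
-- def bfs(graph, root):
--     def go(visited, queue):
--         if not queue:
--             return visited
--         vertex, rest = queue[0], queue[1:]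
--         new = []
--         for n in graph[vertex]:
--             if n not in visited and n not in new:
--                 new.append(n)
--         return go(visited + new, rest + new)
--     return set(go([], [root]))
-- ===== Notes on version B (the rewrite author's own statement) =====
-- stated objective: alternative
-- what changed: Replaced the mutated deque+set while loop by a recursive function over the queue that keeps visited as an ordered duplicate-free list, collects each vertex's fresh neighbours in a separate pass, and builds the returned set only once at the end.
-- outside the precondition, e.g. on bfs({0: [], 1: [2]}, 0): A returns set(), B returns set()
import Mathlib
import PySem

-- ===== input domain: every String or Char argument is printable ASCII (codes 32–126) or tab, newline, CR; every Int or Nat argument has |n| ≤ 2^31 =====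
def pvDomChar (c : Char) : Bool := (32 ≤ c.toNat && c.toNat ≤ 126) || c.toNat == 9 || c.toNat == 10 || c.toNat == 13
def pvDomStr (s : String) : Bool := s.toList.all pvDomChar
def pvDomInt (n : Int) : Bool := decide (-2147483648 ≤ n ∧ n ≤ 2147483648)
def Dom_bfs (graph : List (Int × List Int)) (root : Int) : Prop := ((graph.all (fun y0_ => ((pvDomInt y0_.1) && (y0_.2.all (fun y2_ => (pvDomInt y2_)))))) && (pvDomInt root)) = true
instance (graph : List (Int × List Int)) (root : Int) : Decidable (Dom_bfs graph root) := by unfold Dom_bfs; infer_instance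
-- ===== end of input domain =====

-- B replaces A's deque/set while loop by a recursive queue traversal that accumulates visited as an ordered list and builds the set once at the end (same reachable set; a different decomposition, not faster).


-- ===== PORT A =====
-- fuel guard only: the while loop always terminates within this many iterations
-- (each iteration pops one vertex; the queue only grows together with the
-- duplicate-free visited set, which is bounded by the total neighbour count).
def bfsFuel (graph : List (Int × List Int)) : Nat :=
  2 * graph.foldl (fun a p => a + p.2.length) 0 + 2

def bfsLoop (graph : List (Int × List Int)) :
    Nat → PySem.Set Int → List Int → List Int
  | 0, visited, _ => visited
  | _ + 1, visited, [] => visited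
  | f + 1, visited, vertex :: rest =>
    match (PySem.Dict.mk graph).get? vertex with
    | none => visited  -- Python raises KeyError here; excluded by Pre_bfs
    | some ns =>
      let st := ns.foldl
        (fun (st : PySem.Set Int × List Int) neighbour =>
          if PySem.Set.contains st.1 neighbour then st
          else (PySem.Set.add st.1 neighbour, st.2 ++ [neighbour]))
        (visited, rest)
      bfsLoop graph f st.1 st.2

def bfs (graph : List (Int × List Int)) (root : Int) : List Int :=
  bfsLoop graph (bfsFuel graph) PySem.Set.empty [root]

-- ===== PORT B =====
-- the fresh-neighbour pass of B: keeps the order of graph[vertex], skipping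
-- anything already visited or already collected in this pass
def bfsNewNbrs (visited : List Int) : List Int → List Int → List Int
  | [], new => new
  | n :: ns, new =>
    if n ∈ visited ∨ n ∈ new then bfsNewNbrs visited ns new
    else bfsNewNbrs visited ns (new ++ [n])

-- fuel guard only: B's recursion terminates within bfsFuel steps for the same
-- reason as A's loop (one queue entry consumed per call, entries bounded by the
-- duplicate-free visited list).
def bfsGo (graph : List (Int × List Int)) : Nat → List Int → List Int → List Int
  | 0, visited, _ => visited
  | _ + 1, visited, [] => visited
  | f + 1, visited, vertex :: rest =>
    match (PySem.Dict.mk graph).get? vertex with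
    | none => visited  -- Python raises KeyError here; excluded by Pre_bfs
    | some ns =>
      let new := bfsNewNbrs visited ns []
      bfsGo graph f (visited ++ new) (rest ++ new)

def bfs_alt (graph : List (Int × List Int)) (root : Int) : List Int :=
  PySem.Set.ofList (bfsGo graph (bfsFuel graph) [] [root])

-- ===== PRECONDITION & SPEC =====
-- Pre_bfs excludes the inputs on which the loop dequeues a vertex that is not a key of
-- graph, where Python's graph[vertex] raises KeyError. It is stated as "root and every
-- listed neighbour are keys", which is slightly narrower than A's exact domain: A also
-- returns when a non-key neighbour occurs only in an UNREACHABLE part of the graph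
-- (e.g. ({0: [], 1: [2]}, 0), where both A and B return set()).
def Pre_bfs (graph : List (Int × List Int)) (root : Int) : Prop :=
  root ∈ graph.map Prod.fst ∧
  ∀ p ∈ graph, ∀ n ∈ p.2, n ∈ graph.map Prod.fst
instance (graph : List (Int × List Int)) (root : Int) : Decidable (Pre_bfs graph root) := by
  unfold Pre_bfs; infer_instance

def pvWitness_bfs : (List (Int × List Int)) × Int := ([(0, [1, 2]), (1, [0]), (2, [])], 0)

def Spec_bfs (graph : List (Int × List Int)) (root : Int) (out : List Int) : Prop := out = bfs_alt graph root
instance (graph : List (Int × List Int)) (root : Int) (out : List Int) : Decidable (Spec_bfs graph root out) := by unfold Spec_bfs; infer_instance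

-- ===== CLAIM (what is proved, stated in full; the proofs are below) =====
def Claim_equal_bfs : Prop := ∀ (graph : List (Int × List Int)) (root : Int), Dom_bfs graph root → Pre_bfs graph root → Spec_bfs graph root (bfs graph root)

-- ===== LEMMAS AND PROOFS =====

-- A's inner fold over the neighbour list, started from a visited set of the form
-- vis ++ new, extends both components by exactly B's fresh-neighbour pass.
theorem bfs_fold_eq_newNbrs (ns : List Int) (vis new q : List Int) :
    ns.foldl
      (fun (st : PySem.Set Int × List Int) neighbour =>
        if PySem.Set.contains st.1 neighbour then st
        else (PySem.Set.add st.1 neighbour, st.2 ++ [neighbour]))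
      (vis ++ new, q ++ new)
    = (vis ++ bfsNewNbrs vis ns new, q ++ bfsNewNbrs vis ns new) := by
  induction ns generalizing new with
  | nil => simp [bfsNewNbrs]
  | cons n ns ih =>
    simp only [List.foldl_cons, bfsNewNbrs]
    by_cases h : n ∈ vis ∨ n ∈ new
    · rw [if_pos (by simp [PySem.Set.contains]; tauto),
        if_pos h]
      exact ih new
    · rw [if_neg (by simp [PySem.Set.contains]; tauto), if_neg h]
      have hadd : PySem.Set.add (vis ++ new) n = vis ++ (new ++ [n]) := by
        simp only [PySem.Set.add]
        rw [if_neg (by simp [PySem.Set.contains]; tauto), List.append_assoc]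
      rw [hadd, List.append_assoc]
      exact ih (new ++ [n])

-- A's loop and B's recursion carry literally the same visited list and queue.
theorem bfs_loop_eq_go (graph : List (Int × List Int)) (f : Nat) (vis q : List Int) :
    bfsLoop graph f vis q = bfsGo graph f vis q := by
  induction f generalizing vis q with
  | zero => rfl
  | succ f ih =>
    cases q with
    | nil => rfl
    | cons vertex rest =>
      simp only [bfsLoop, bfsGo]
      cases h : (PySem.Dict.mk graph).get? vertex with
      | none => rfl
      | some ns =>
        have := bfs_fold_eq_newNbrs ns vis [] rest
        simp only [List.append_nil] at this
        simp only [this]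
        exact ih _ _

-- B's fresh-neighbour pass keeps vis ++ new duplicate-free.
theorem bfs_newNbrs_nodup (ns : List Int) (vis new : List Int)
    (h : (vis ++ new).Nodup) : (vis ++ bfsNewNbrs vis ns new).Nodup := by
  induction ns generalizing new with
  | nil => simpa [bfsNewNbrs] using h
  | cons n ns ih =>
    simp only [bfsNewNbrs]
    by_cases hm : n ∈ vis ∨ n ∈ new
    · rw [if_pos hm]; exact ih new h
    · rw [if_neg hm]
      refine ih (new ++ [n]) ?_
      push Not at hm
      have hni : n ∉ vis ++ new := by simp [hm.1, hm.2]
      rw [← List.append_assoc]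
      exact List.nodup_append.2 ⟨h, List.nodup_singleton n,
        fun a ha b hb => by
          simp only [List.mem_singleton] at hb
          subst hb
          exact fun he => hni (he ▸ ha)⟩

-- B's recursion keeps the visited list duplicate-free.
theorem bfs_go_nodup (graph : List (Int × List Int)) (f : Nat) (vis q : List Int)
    (h : vis.Nodup) : (bfsGo graph f vis q).Nodup := by
  induction f generalizing vis q with
  | zero => exact h
  | succ f ih =>
    cases q with
    | nil => exact h
    | cons vertex rest =>
      simp only [bfsGo]
      cases hg : (PySem.Dict.mk graph).get? vertex with
      | none => exact h
      | some ns =>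
        exact ih _ _ (bfs_newNbrs_nodup ns vis [] (by simpa using h))

-- set(l) on a duplicate-free list l is l itself.
theorem set_ofList_of_nodup (l : List Int) (h : l.Nodup) : PySem.Set.ofList l = l := by
  suffices H : ∀ (acc : List Int), (acc ++ l).Nodup →
      l.foldl PySem.Set.add acc = acc ++ l by
    simpa using H [] (by simpa using h)
  clear h
  induction l with
  | nil => simp
  | cons a l ih =>
    intro acc h
    have ha : a ∉ acc := by
      simp only [List.nodup_append] at h
      intro hc; exact h.2.2 a hc a (by simp) rfl
    simp only [List.foldl_cons, PySem.Set.add]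
    rw [if_neg (by simp [PySem.Set.contains, ha])]
    have := ih (acc ++ [a]) (by simpa using h)
    simpa [List.append_assoc] using this

-- ===== VERDICT (by name: the statement is the Claim_ definition above) =====
theorem bfs_spec : Claim_equal_bfs := by
  intro graph root _ _
  unfold Spec_bfs bfs bfs_alt
  rw [set_ofList_of_nodup _ (bfs_go_nodup graph _ _ _ List.nodup_nil)]
  exact bfs_loop_eq_go graph (bfsFuel graph) [] [root]
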